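-- pv_equiv track=rewrite | github.com/clemensv/avrotize | avrotize/avrotodb.py | compact_table_name
-- ===== SOURCE A (Python) =====
-- def compact_table_name(table_name, max_length):
--     """
--     Compacts the table name to fit the specified maximum length.
--
--     Args:
--         table_name (str): Table name.
--         max_length (int): Maximum length of the table name.
--
--     Returns:
--         str: Compacted table name.
--     """
--     if len(table_name) > max_length:
--         # Drop vowels, one by one, seek from end
--         vowels = "aeiou"
--         while len(table_name) > max_length:
--             count = 0
--             for i in range(len(table_name) - 1, -1, -1):
--                 if table_name[i].lower() in vowels:
--                     count += 1
--                     table_name = table_name[:i] + table_name[i + 1:]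
--                     break
--             if count == 0:
--                 break
--     return table_name[:max_length]
-- ===== SOURCE B (Python) =====
-- def compact_table_name(table_name, max_length):
--     """
--     Compacts the table name to fit the specified maximum length.
--     Count-then-single-forward-pass: keep all consonants and only the first
--     `keep` vowels, where `keep` is the vowel budget left after dropping
--     enough (rightmost) vowels to reach max_length.
--     """
--     if len(table_name) <= max_length:
--         return table_name[:max_length]
--     vowels = "aeiou"
--     total = sum(1 for c in table_name if c.lower() in vowels)
--     keep = total - (len(table_name) - max_length)
--     out = []
--     kept = 0
--     for c in table_name:
--         if c.lower() in vowels: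
--             if kept < keep:
--                 out.append(c)
--                 kept += 1
--         else:
--             out.append(c)
--     return "".join(out)[:max_length]
-- ===== Notes on version B (the rewrite author's own statement) =====
-- stated objective: faster
-- what changed: A repeatedly rescans the string right-to-left and rebuilds it to drop one vowel per iteration; B counts vowels once, computes the vowel budget that survives, and builds the result in a single forward pass keeping consonants and only the first `keep` vowels.
import Mathlib
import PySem

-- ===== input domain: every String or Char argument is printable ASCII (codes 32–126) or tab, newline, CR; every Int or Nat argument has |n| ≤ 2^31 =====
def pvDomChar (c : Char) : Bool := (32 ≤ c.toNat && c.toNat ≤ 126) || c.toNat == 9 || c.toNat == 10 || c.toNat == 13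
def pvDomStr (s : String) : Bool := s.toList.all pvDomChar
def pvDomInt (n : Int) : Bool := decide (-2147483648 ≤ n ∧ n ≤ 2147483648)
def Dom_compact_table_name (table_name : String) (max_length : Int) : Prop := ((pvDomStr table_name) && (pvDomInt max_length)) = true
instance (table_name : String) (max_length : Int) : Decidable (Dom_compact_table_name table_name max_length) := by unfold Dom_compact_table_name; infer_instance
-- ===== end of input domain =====

-- B re-implements A's repeated right-to-left vowel-dropping rescans as one vowel count plus a
-- single forward pass with a vowel budget (objective: faster, one pass instead of O(n) rescans).

-- ===== PORT A =====
-- `c.lower() in "aeiou"`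
def pvIsVowel (c : Char) : Bool := PySem.Chars.lowerChar c ∈ ['a', 'e', 'i', 'o', 'u']

-- A's inner `for i in range(len-1, -1, -1): if vowel: break` — the index of the LAST vowel,
-- written as the equivalent structural recursion (last match from the right).
def pvLastVowelIdx : List Char → Option Nat
  | [] => none
  | c :: t =>
    match pvLastVowelIdx t with
    | some j => some (j + 1)
    | none => if pvIsVowel c then some 0 else none

-- needed by pvALoop's termination proof
theorem pvLastVowelIdx_lt : ∀ {s : List Char} {i : Nat}, pvLastVowelIdx s = some i → i < s.length := by
  intro s
  induction s with
  | nil => intro i h; simp [pvLastVowelIdx] at h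
  | cons c t ih =>
    intro i h
    simp only [pvLastVowelIdx] at h
    cases ht : pvLastVowelIdx t with
    | some j => rw [ht] at h; simp at h; have := ih ht; simp [List.length_cons]; omega
    | none => rw [ht] at h; split_ifs at h; simp_all; omega

-- A's `while len(table_name) > max_length:` loop: remove the rightmost vowel
-- (table_name[:i] + table_name[i+1:]) or break if the scan found none.
def pvALoop (s : List Char) (max_length : Int) : List Char :=
  if (s.length : Int) > max_length then
    match h : pvLastVowelIdx s with
    | some i => pvALoop (s.take i ++ s.drop (i + 1)) max_length
    | none => s
  else s
termination_by s.length
decreasing_by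
  have := pvLastVowelIdx_lt h
  simp [List.length_append, List.length_take, List.length_drop]; omega

def compact_table_name (table_name : String) (max_length : Int) : String :=
  String.ofList (PySem.List.slice (pvALoop table_name.toList max_length) none (some max_length))

-- ===== PORT B =====
-- `sum(1 for c in table_name if c.lower() in vowels)`
def pvVowelCount (s : List Char) : Int := (s.countP pvIsVowel : Int)

-- B's single forward pass: consonants always kept, vowels kept while kept < keep
def pvBPass : List Char → Int → Int → List Char
  | [], _, _ => []
  | c :: t, kept, keep =>
    if pvIsVowel c then
      if kept < keep then c :: pvBPass t (kept + 1) keep else pvBPass t kept keep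
    else c :: pvBPass t kept keep

def compact_table_name_alt (table_name : String) (max_length : Int) : String :=
  let s := table_name.toList
  if (s.length : Int) ≤ max_length then
    String.ofList (PySem.List.slice s none (some max_length))
  else
    let keep := pvVowelCount s - ((s.length : Int) - max_length)
    String.ofList (PySem.List.slice (pvBPass s 0 keep) none (some max_length))

-- ===== PRECONDITION & SPEC =====
def Spec_compact_table_name (table_name : String) (max_length : Int) (out : String) : Prop := out = compact_table_name_alt table_name max_length
instance (table_name : String) (max_length : Int) (out : String) : Decidable (Spec_compact_table_name table_name max_length out) := by unfold Spec_compact_table_name; infer_instance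

-- ===== CLAIM (what is proved, stated in full; the proofs are below) =====
def Claim_equal_compact_table_name : Prop := ∀ (table_name : String) (max_length : Int), Dom_compact_table_name table_name max_length → Spec_compact_table_name table_name max_length (compact_table_name table_name max_length)

-- ===== LEMMAS AND PROOFS =====

-- proof-side reformulation of B's pass: remaining vowel budget instead of a kept-so-far counter
def pvKeep : List Char → Int → List Char
  | [], _ => []
  | c :: t, k =>
    if pvIsVowel c then
      (if 0 < k then c :: pvKeep t (k - 1) else pvKeep t k)
    else c :: pvKeep t k

theorem pvBPass_eq_pvKeep : ∀ (s : List Char) (kept keep : Int), pvBPass s kept keep = pvKeep s (keep - kept) := by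
  intro s
  induction s with
  | nil => intro kept keep; simp [pvBPass, pvKeep]
  | cons c t ih =>
    intro kept keep
    simp only [pvBPass, pvKeep]
    by_cases hv : pvIsVowel c <;> simp [hv]
    · by_cases hk : kept < keep
      · rw [if_pos hk, ih, show keep - (kept + 1) = keep - kept - 1 from by ring, if_pos hk]
      · rw [if_neg hk, ih, if_neg hk]
    · rw [ih]

theorem pvKeep_all : ∀ (s : List Char) (k : Int), (s.countP pvIsVowel : Int) ≤ k → pvKeep s k = s := by
  intro s
  induction s with
  | nil => intro k _; simp [pvKeep]
  | cons c t ih =>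
    intro k hk
    simp only [pvKeep]
    rw [List.countP_cons] at hk
    by_cases hv : pvIsVowel c <;> simp [hv] at hk ⊢
    · rw [if_pos (by omega), ih _ (by omega)]
    · exact ih _ (by push_cast at hk ⊢; omega)

theorem pvLastVowelIdx_none_novowel : ∀ {s : List Char}, pvLastVowelIdx s = none → s.countP pvIsVowel = 0 := by
  intro s
  induction s with
  | nil => intro _; simp
  | cons c t ih =>
    intro h
    simp only [pvLastVowelIdx] at h
    cases ht : pvLastVowelIdx t with
    | some j => rw [ht] at h; simp at h
    | none =>
      rw [ht] at h
      split_ifs at h with hv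
      rw [List.countP_cons, ih ht]; simp [hv]

theorem pvLastVowelIdx_some_count : ∀ {s : List Char} {i : Nat}, pvLastVowelIdx s = some i →
    (s.take i ++ s.drop (i + 1)).countP pvIsVowel + 1 = s.countP pvIsVowel := by
  intro s
  induction s with
  | nil => intro i h; simp [pvLastVowelIdx] at h
  | cons c t ih =>
    intro i h
    simp only [pvLastVowelIdx] at h
    cases ht : pvLastVowelIdx t with
    | some j =>
      rw [ht] at h; simp at h
      subst h
      simp only [List.take_succ_cons, List.drop_succ_cons, List.cons_append, List.countP_cons]
      rw [← ih ht]; omega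
    | none =>
      rw [ht] at h
      split_ifs at h with hv
      simp at h; subst h
      simp [hv]

theorem pvKeep_remove : ∀ (s : List Char) (i : Nat) (k : Int), pvLastVowelIdx s = some i →
    k < (s.countP pvIsVowel : Int) → pvKeep (s.take i ++ s.drop (i + 1)) k = pvKeep s k := by
  intro s
  induction s with
  | nil => intro i k h; simp [pvLastVowelIdx] at h
  | cons c t ih =>
    intro i k h hk
    simp only [pvLastVowelIdx] at h
    rw [List.countP_cons] at hk
    cases ht : pvLastVowelIdx t with
    | some j =>
      rw [ht] at h; simp at h
      subst h
      have hct : 0 < t.countP pvIsVowel := by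
        have := pvLastVowelIdx_some_count ht; omega
      simp only [List.take_succ_cons, List.drop_succ_cons, List.cons_append, pvKeep]
      by_cases hv : pvIsVowel c <;> simp [hv] at hk ⊢
      · by_cases h0 : (0:Int) < k
        · rw [if_pos h0, if_pos h0, ih _ _ ht (by omega)]
        · rw [if_neg h0, if_neg h0, ih _ _ ht (by push_cast; omega)]
      · rw [ih _ _ ht (by omega)]
    | none =>
      rw [ht] at h
      split_ifs at h with hv
      simp at h; subst h
      have h0 := pvLastVowelIdx_none_novowel ht
      simp [hv, h0] at hk
      simp only [List.take_zero, List.drop_succ_cons, List.drop_zero, List.nil_append, pvKeep, hv,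
        if_true]
      rw [if_neg (by omega : ¬ (0:Int) < k)]

theorem pvKeep_novowel : ∀ (s : List Char) (k : Int), s.countP pvIsVowel = 0 → pvKeep s k = s := by
  intro s
  induction s with
  | nil => intro k _; simp [pvKeep]
  | cons c t ih =>
    intro k h
    rw [List.countP_cons] at h
    have hv : pvIsVowel c = false := by by_contra hc; simp at hc; simp [hc] at h
    simp [pvKeep, hv, ih k (by omega)]

theorem pvALoop_eq : ∀ (n : Nat) (s : List Char), s.length = n → ∀ (m : Int),
    pvALoop s m = pvKeep s ((s.countP pvIsVowel : Int) - ((s.length : Int) - m)) := by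
  intro n
  induction n using Nat.strong_induction_on with
  | _ n ih =>
    intro s hs m
    rw [pvALoop]
    split_ifs with hlen
    · split
      · rename_i i h
        have hi := pvLastVowelIdx_lt h
        have hlr : (List.take i s ++ List.drop (i + 1) s).length = s.length - 1 := by
          simp [List.length_append, List.length_take, List.length_drop]; omega
        have hcr := pvLastVowelIdx_some_count h
        have hrec := ih (n - 1) (by omega) (List.take i s ++ List.drop (i + 1) s) (by omega) m
        rw [hrec, hlr]
        have hbud : ((List.countP pvIsVowel (List.take i s ++ List.drop (i + 1) s) : Int) -
            (((s.length - 1 : Nat) : Int) - m)) = ((s.countP pvIsVowel : Int) - ((s.length : Int) - m)) := by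
          have h1 : 1 ≤ s.length := by omega
          push_cast [← hcr, Nat.cast_sub h1]
          ring
        rw [hbud]
        exact pvKeep_remove s i _ h (by omega)
      · rename_i h
        rw [pvKeep_novowel s _ (pvLastVowelIdx_none_novowel h)]
    · rw [pvKeep_all]
      omega

-- ===== VERDICT (by name: the statement is the Claim_ definition above) =====
theorem compact_table_name_spec : Claim_equal_compact_table_name := by
  intro table_name max_length _
  simp only [Spec_compact_table_name, compact_table_name, compact_table_name_alt]
  by_cases hle : ((table_name.toList.length : Int) ≤ max_length)
  · rw [if_pos hle, pvALoop, if_neg (by omega)]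
  · rw [if_neg hle, pvALoop_eq table_name.toList.length table_name.toList rfl max_length,
      pvBPass_eq_pvKeep]
    simp [pvVowelCount]
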